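-- pv_equiv track=rewrite | github.com/aparjadis/Hanalog_MOPTA2022 | Python/solve_week.py | costs_noEmergency
-- ===== SOURCE A (Python) =====
-- specialties_mean = [99,132,78,75,142,72]
--
-- C_WAITING = 2 #cost of waiting for an OR, per minute
--
-- C_OVERTIME = 5 #cost of working overtime, per minute
--
-- C_IDLE = 1 #cost of waiting for a surgery, per minute
--
-- def costs_noEmergency(s,t,l):
--
--     id_c, wa_c, ov_c = 0,0,0
--     T = [t[i] for i in range(l)]
--     dur = [specialties_mean[s] for i in range(l)]
--     for i in range(len(T)-1):
--
--         if T[i]+dur[i] > T[i+1]: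
--             wa_c += (T[i]+dur[i]-T[i+1])*C_WAITING
--         elif T[i]+dur[i] < T[i+1]:
--             id_c += (T[i+1]-(T[i]+dur[i]))*C_IDLE
--         T[i+1] = max(T[i+1],T[i]+dur[i])
--
--     if l > 0:
--         if T[-1]+specialties_mean[s] > 60*8:
--             ov_c += (T[-1]+dur[-1]-60*8)*C_OVERTIME
--         else:
--             id_c += (60*8-(T[-1]+dur[-1]))*C_IDLE
--     else:
--         return (60*8)*C_IDLE,wa_c,ov_c
--
--     return id_c,wa_c,ov_c
-- ===== SOURCE B (Python) =====
-- specialties_mean = [99,132,78,75,142,72]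
--
-- C_WAITING = 2 #cost of waiting for an OR, per minute
--
-- C_OVERTIME = 5 #cost of working overtime, per minute
--
-- C_IDLE = 1 #cost of waiting for a surgery, per minute
--
-- def costs_noEmergency(s, t, l):
--     # Different decomposition: first build the table of actual start times
--     # (cumulative max scan), then compute waiting/idle as max(.,0)-sums over
--     # zipped (finish, next scheduled start) pairs; final overtime/idle term last.
--     if l <= 0:
--         return (60*8)*C_IDLE, 0, 0
--     D = specialties_mean[s]
--     start = []
--     cur = None
--     for x in t[:l]:
--         cur = x if cur is None else max(x, cur + D)
--         start.append(cur)
--     finishes = [c + D for c in start]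
--     wa_c = C_WAITING * sum(max(f - x, 0) for f, x in zip(finishes, t[1:l]))
--     id_c = C_IDLE * sum(max(x - f, 0) for f, x in zip(finishes, t[1:l]))
--     fin = finishes[-1]
--     if fin > 60*8:
--         return id_c, wa_c, C_OVERTIME * (fin - 60*8)
--     return id_c + C_IDLE * (60*8 - fin), wa_c, 0
-- ===== Notes on version B (the rewrite author's own statement) =====
-- stated objective: simpler
-- what changed: B replaces A's index loop that mutates T[i+1] in place (with if/elif branching) by a cumulative-max scan building the start-time table once, followed by max(.,0)-sums over zipped (finish, next scheduled start) pairs and a final overtime/idle term.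
import Mathlib
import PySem

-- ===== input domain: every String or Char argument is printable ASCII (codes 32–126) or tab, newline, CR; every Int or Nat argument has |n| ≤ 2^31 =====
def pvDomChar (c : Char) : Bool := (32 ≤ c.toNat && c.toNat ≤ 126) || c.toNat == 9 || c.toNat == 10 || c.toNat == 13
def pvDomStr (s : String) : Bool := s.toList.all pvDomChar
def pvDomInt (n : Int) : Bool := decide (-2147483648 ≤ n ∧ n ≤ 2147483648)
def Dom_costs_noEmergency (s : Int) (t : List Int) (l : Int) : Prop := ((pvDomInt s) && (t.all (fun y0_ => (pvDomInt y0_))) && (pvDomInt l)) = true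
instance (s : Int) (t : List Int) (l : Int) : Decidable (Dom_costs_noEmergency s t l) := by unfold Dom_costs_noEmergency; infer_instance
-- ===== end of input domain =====

-- B replaces A's index loop with in-place list mutation by a cumulative-max scan of
-- start times followed by max(.,0)-sums over zipped (finish, next-start) pairs (simpler
-- decomposition, same cost); return-value equivalence only (A mutates only locals).

def specialtiesMean : List Int := [99, 132, 78, 75, 142, 72]

-- ===== PORT A =====
def costs_noEmergency (s : Int) (t : List Int) (l : Int) : Int × Int × Int :=
  -- T = [t[i] for i in range(l)]; dur = [specialties_mean[s] for i in range(l)]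
  let T0 := (PySem.List.pyRange 0 l).map (fun i => (PySem.List.pyGet? t i).getD 0)
  let dur := (PySem.List.pyRange 0 l).map (fun _ => (PySem.List.pyGet? specialtiesMean s).getD 0)
  -- for i in range(len(T)-1): branch on T[i]+dur[i] vs T[i+1], then T[i+1] = max(...)
  let st := (PySem.List.pyRange 0 ((T0.length : Int) - 1)).foldl
    (fun (st : List Int × Int × Int) i =>
      let T := st.1
      let f := (PySem.List.pyGet? T i).getD 0 + (PySem.List.pyGet? dur i).getD 0
      let nxt := (PySem.List.pyGet? T (i + 1)).getD 0
      let acc :=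
        if f > nxt then (st.2.1, st.2.2 + (f - nxt) * 2)
        else if f < nxt then (st.2.1 + (nxt - f) * 1, st.2.2)
        else (st.2.1, st.2.2)
      (PySem.List.pySetD T (i + 1) (max nxt f), acc.1, acc.2))
    (T0, 0, 0)
  if l > 0 then
    let last := (PySem.List.pyGet? st.1 (-1)).getD 0
    let dlast := (PySem.List.pyGet? dur (-1)).getD 0
    if last + (PySem.List.pyGet? specialtiesMean s).getD 0 > 60 * 8 then
      (st.2.1, st.2.2, 0 + (last + dlast - 60 * 8) * 5)
    else
      (st.2.1 + (60 * 8 - (last + dlast)) * 1, st.2.2, 0)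
  else ((60 * 8) * 1, st.2.2, 0)

-- ===== PORT B =====
-- the body of B's scan loop: fold one scheduled time into (current start, start table)
def pvStep (D : Int) (p : Option Int × List Int) (x : Int) : Option Int × List Int :=
  let c := match p.1 with
    | none => x
    | some c => max x (c + D)
  (some c, p.2 ++ [c])

def costs_noEmergency_alt (s : Int) (t : List Int) (l : Int) : Int × Int × Int :=
  if l ≤ 0 then ((60 * 8) * 1, 0, 0)
  else
    let D := (PySem.List.pyGet? specialtiesMean s).getD 0
    -- cumulative-max scan over t[:l] building the actual start times
    let p := (PySem.List.slice t none (some l)).foldl (pvStep D) (none, [])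
    let finishes := p.2.map (fun c => c + D)
    let pairs := finishes.zip (PySem.List.slice t (some 1) (some l))
    let wa_c := 2 * (pairs.map (fun q => max (q.1 - q.2) 0)).sum
    let id_c := 1 * (pairs.map (fun q => max (q.2 - q.1) 0)).sum
    let fin := (PySem.List.pyGet? finishes (-1)).getD 0
    if fin > 60 * 8 then (id_c, wa_c, 5 * (fin - 60 * 8))
    else (id_c + 1 * (60 * 8 - fin), wa_c, 0)

-- ===== PRECONDITION & SPEC =====
-- Pre_ excludes exactly the inputs where A raises an IndexError: l > len(t)
-- (the comprehension reads t[l-1]) or, when l > 0, s outside [-6, 6) (specialties_mean[s]).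
def Pre_costs_noEmergency (s : Int) (t : List Int) (l : Int) : Prop :=
  0 < l → (l ≤ t.length ∧ -6 ≤ s ∧ s < 6)
instance (s : Int) (t : List Int) (l : Int) : Decidable (Pre_costs_noEmergency s t l) := by
  unfold Pre_costs_noEmergency; infer_instance

def pvWitness_costs_noEmergency : Int × List Int × Int := (2, [30, 100, 150], 3)

def Spec_costs_noEmergency (s : Int) (t : List Int) (l : Int) (out : Int × Int × Int) : Prop := out = costs_noEmergency_alt s t l
instance (s : Int) (t : List Int) (l : Int) (out : Int × Int × Int) : Decidable (Spec_costs_noEmergency s t l out) := by unfold Spec_costs_noEmergency; infer_instance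

-- ===== CLAIM (what is proved, stated in full; the proofs are below) =====
def Claim_equal_costs_noEmergency : Prop := ∀ (s : Int) (t : List Int) (l : Int), Dom_costs_noEmergency s t l → Pre_costs_noEmergency s t l → Spec_costs_noEmergency s t l (costs_noEmergency s t l)

-- ===== LEMMAS AND PROOFS =====

-- the sequence of actual start times, beginning at cur
def pvStarts (D cur : Int) : List Int → List Int
  | [] => [cur]
  | x :: xs => cur :: pvStarts D (max x (cur + D)) xs

-- the last actual start time
def pvLast (D cur : Int) : List Int → Int
  | [] => cur
  | x :: xs => pvLast D (max x (cur + D)) xs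

-- reference loop: carries (idle, waiting) accumulators and current start
def pvLoop (D cur idc wac : Int) : List Int → Int × Int
  | [] => (idc, wac)
  | x :: xs => pvLoop D (max x (cur + D)) (idc + max (x - (cur + D)) 0)
      (wac + 2 * max ((cur + D) - x) 0) xs

lemma pvStarts_getLast? (D cur : Int) (xs : List Int) :
    (pvStarts D cur xs).getLast? = some (pvLast D cur xs) := by
  induction xs generalizing cur with
  | nil => simp [pvStarts, pvLast]
  | cons x xs ih =>
      simp [pvStarts, pvLast, List.getLast?_cons, ih]

lemma pvTake_eq_map (t : List Int) (n : Nat) (h : n ≤ t.length) :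
    (PySem.List.pyRange 0 (n : Int)).map (fun i => (PySem.List.pyGet? t i).getD 0) = t.take n := by
  rw [PySem.List.pyRange_zero_natCast, List.map_map]
  apply List.ext_getElem
  · simp [h]
  · intro i h1 h2
    simp only [List.getElem_map, List.getElem_range, Function.comp]
    have hi : i < t.length := by simp at h1; omega
    simp [PySem.List.pyGet?_natCast, List.getElem?_eq_getElem hi]

-- A's fold, started after a finalized prefix, computes pvLoop / pvStarts
lemma pvFoldA (D : Int) (dur : List Int)
    (hD : ∀ i : Nat, i < dur.length → dur[i]? = some D) :
    ∀ (xs pre : List Int) (cur idc wac : Int),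
      pre.length + 1 + xs.length ≤ dur.length →
      (PySem.List.pyRange (pre.length : Int) ((pre.length + xs.length : Nat) : Int)).foldl
        (fun (st : List Int × Int × Int) i =>
          let T := st.1
          let f := (PySem.List.pyGet? T i).getD 0 + (PySem.List.pyGet? dur i).getD 0
          let nxt := (PySem.List.pyGet? T (i + 1)).getD 0
          let acc :=
            if f > nxt then (st.2.1, st.2.2 + (f - nxt) * 2)
            else if f < nxt then (st.2.1 + (nxt - f) * 1, st.2.2)
            else (st.2.1, st.2.2)
          (PySem.List.pySetD T (i + 1) (max nxt f), acc.1, acc.2))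
        (pre ++ cur :: xs, idc, wac)
      = (pre ++ pvStarts D cur xs, (pvLoop D cur idc wac xs).1, (pvLoop D cur idc wac xs).2) := by
  intro xs
  induction xs with
  | nil =>
      intro pre cur idc wac _
      simp [PySem.List.pyRange_one_eq_nil, pvStarts, pvLoop]
  | cons x rest ih =>
      intro pre cur idc wac hlen
      have hcons : PySem.List.pyRange (pre.length : Int) ((pre.length + (x :: rest).length : Nat) : Int)
          = (pre.length : Int) :: PySem.List.pyRange ((pre.length : Int) + 1) ((pre.length + (x :: rest).length : Nat) : Int) := by
        apply PySem.List.pyRange_one_cons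
        simp only [List.length_cons]
        omega
      rw [hcons, List.foldl_cons]
      have hTi : PySem.List.pyGet? (pre ++ cur :: x :: rest) (pre.length : Int) = some cur :=
        PySem.List.pyGet?_append_length pre _ cur
      have hTi1 : PySem.List.pyGet? (pre ++ cur :: x :: rest) ((pre.length : Int) + 1) = some x := by
        have := PySem.List.pyGet?_append_right pre (cur :: x :: rest) 1
        simpa using this
      have hdur : PySem.List.pyGet? dur (pre.length : Int) = some D := by
        rw [PySem.List.pyGet?_natCast]
        exact hD pre.length (by omega)
      have hset : PySem.List.pySetD (pre ++ cur :: x :: rest) ((pre.length : Int) + 1)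
            (max x (cur + D)) = (pre ++ [cur]) ++ (max x (cur + D)) :: rest := by
        rw [PySem.List.pySetD_of_nonneg _ _ (by omega)]
        have : ((pre.length : Int) + 1).toNat = pre.length + 1 := by omega
        rw [this]
        have h1 : pre.length + 1 = (pre ++ [cur]).length := by simp
        rw [show pre ++ cur :: x :: rest = (pre ++ [cur]) ++ x :: rest by simp, h1,
          List.set_append_right _ _ (by omega)]
        simp
      simp only [hTi, hTi1, hdur, Option.getD_some, hset]
      have hrange : ((pre.length : Int) + 1) = (((pre ++ [cur]).length : Nat) : Int) := by simp
      have hrange2 : ((pre.length + (x :: rest).length : Nat) : Int)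
          = (((pre ++ [cur]).length + rest.length : Nat) : Int) := by simp; omega
      have hlen' : (pre ++ [cur]).length + 1 + rest.length ≤ dur.length := by
        simp only [List.length_append, List.length_cons, List.length_nil] at hlen ⊢; omega
      rw [hrange, hrange2, ih (pre ++ [cur]) (max x (cur + D)) _ _ hlen']
      have hacc : (if cur + D > x then (idc, wac + (cur + D - x) * 2)
            else if cur + D < x then (idc + (x - (cur + D)) * 1, wac) else (idc, wac))
          = (idc + max (x - (cur + D)) 0, wac + 2 * max ((cur + D) - x) 0) := by
        split_ifs <;> exact Prod.ext (by simp; omega) (by simp; omega)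
      rw [hacc]
      simp [pvStarts, pvLoop]

-- B's scan fold builds pvStarts
lemma pvFoldB (D : Int) :
    ∀ (xs acc : List Int) (cur : Int),
      xs.foldl (pvStep D) (some cur, acc)
      = (some (pvLast D cur xs), acc ++ (pvStarts D cur xs).tail) := by
  intro xs
  induction xs with
  | nil => intro acc cur; simp [pvLast, pvStarts]
  | cons x rest ih =>
      intro acc cur
      simp only [List.foldl_cons, pvStep, ih, pvLast, pvStarts, List.tail_cons]
      cases rest <;> simp [pvStarts]

-- the zipped max(.,0)-sums are pvLoop's accumulators
lemma pvSums (D : Int) :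
    ∀ (xs : List Int) (cur idc wac : Int),
      pvLoop D cur idc wac xs
      = (idc + ((((pvStarts D cur xs).map (fun c => c + D)).zip xs).map
            (fun q => max (q.2 - q.1) 0)).sum,
         wac + 2 * ((((pvStarts D cur xs).map (fun c => c + D)).zip xs).map
            (fun q => max (q.1 - q.2) 0)).sum) := by
  intro xs
  induction xs with
  | nil => intro cur idc wac; simp [pvLoop, pvStarts]
  | cons x rest ih =>
      intro cur idc wac
      simp only [pvLoop, pvStarts, List.map_cons, List.zip_cons_cons, List.sum_cons, ih]
      simp only [Prod.mk.injEq]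
      exact ⟨by ring, by ring⟩

lemma pvLast_map (D cur : Int) (xs : List Int) :
    ((pvStarts D cur xs).map (fun c => c + D)).getLast? = some (pvLast D cur xs + D) := by
  rw [List.getLast?_map, pvStarts_getLast?]; rfl

-- ===== VERDICT (by name: the statement is the Claim_ definition above) =====
theorem costs_noEmergency_spec : Claim_equal_costs_noEmergency := by
  intro s t l _ hpre
  unfold Spec_costs_noEmergency costs_noEmergency costs_noEmergency_alt
  by_cases hl : l ≤ 0
  · -- range(l) is empty, A skips everything and returns (480, 0, 0)
    simp [PySem.List.pyRange_one_eq_nil hl, hl]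
  · replace hl : (0:Int) < l := by omega
    obtain ⟨hlt, hs⟩ := hpre hl
    obtain ⟨n, rfl⟩ : ∃ n : Nat, l = (n : Int) := ⟨l.toNat, by omega⟩
    have hnt : n ≤ t.length := by exact_mod_cast hlt
    have hn1 : 1 ≤ n := by exact_mod_cast hl
    obtain ⟨x0, tl, ht⟩ : ∃ x0 tl, t = x0 :: tl := by
      cases t with
      | nil => simp at hnt; omega
      | cons a b => exact ⟨a, b, rfl⟩
    simp only []   -- zeta-reduce the let-bindings of both ports
    set D := (PySem.List.pyGet? specialtiesMean s).getD 0 with hD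
    -- T0 = t.take n
    rw [pvTake_eq_map t n hnt]
    set xs := tl.take (n - 1) with hxs
    have htake : t.take n = x0 :: xs := by
      rw [ht]
      cases n with
      | zero => omega
      | succ m => simp [hxs]
    have hxslen : xs.length = n - 1 := by
      simp [hxs, ht] at hnt ⊢; omega
    -- dur = replicate n D
    have hdur : (PySem.List.pyRange 0 ((n : Nat) : Int)).map
        (fun _ => (PySem.List.pyGet? specialtiesMean s).getD 0) = List.replicate n D := by
      rw [PySem.List.pyRange_zero_natCast, List.map_map]
      simp [List.eq_replicate_iff, hD]
    rw [htake, hdur]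
    have hfold := pvFoldA D (List.replicate n D)
      (by intro i hi; simp at hi; simp [hi])
      xs [] x0 0 0 (by simp [hxslen]; omega)
    simp only [List.nil_append, List.length_nil, Nat.zero_add, Nat.cast_zero] at hfold
    have hlen0 : ((x0 :: xs).length : Int) - 1 = ((xs.length : Nat) : Int) := by
      simp
    rw [hlen0, hfold]
    -- B side
    have hslice1 : PySem.List.slice t none (some ((n : Nat) : Int)) = x0 :: xs := by
      rw [PySem.List.slice_to_natCast, htake]
    have hslice2 : PySem.List.slice t (some 1) (some ((n : Nat) : Int)) = xs := by
      rw [show (1 : Int) = ((1 : Nat) : Int) by simp, PySem.List.slice_natCast]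
      simp [ht, hxs]
    rw [if_pos (show (0 : Int) < (n : Int) by exact_mod_cast hl),
      if_neg (show ¬ ((n : Int) ≤ 0) by omega), hslice1, hslice2]
    simp only [List.foldl_cons]
    rw [show pvStep D (none, []) x0 = (some x0, [x0]) from rfl, pvFoldB D xs [x0] x0]
    have hstail : [x0] ++ (pvStarts D x0 xs).tail = pvStarts D x0 xs := by
      cases xs <;> simp [pvStarts]
    rw [hstail]
    -- last elements
    have hlastA : (PySem.List.pyGet? (pvStarts D x0 xs) (-1)).getD 0 = pvLast D x0 xs := by
      rw [PySem.List.pyGet?_neg_one, pvStarts_getLast?]; rfl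
    have hlastdur : (PySem.List.pyGet? (List.replicate n D) (-1)).getD 0 = D := by
      rw [PySem.List.pyGet?_neg_one, List.getLast?_eq_getElem?]
      simp [show 0 < n by omega]
    have hlastB : (PySem.List.pyGet? ((pvStarts D x0 xs).map (fun c => c + D)) (-1)).getD 0
        = pvLast D x0 xs + D := by
      rw [PySem.List.pyGet?_neg_one, pvLast_map]; rfl
    rw [hlastA, hlastdur, hlastB]
    rw [pvSums D xs x0 0 0]
    simp only [zero_add]
    split_ifs with hgt <;> simp only [Prod.mk.injEq] <;> and_intros <;> first
      | trivial
      | ring
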